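-- pv_equiv track=rewrite | github.com/iT-Boyer/iFastlane | Resources/build-targets/build-targets.py | judge_dst_target_or_bundle
-- ===== SOURCE A (Python) =====
-- def judge_dst_target_or_bundle(target:str, dst_targets:list):
--     if target == "" or dst_targets is None:
--         return False
--     lower_target = target.lower()
--     lower_targets = [x.lower() for x in dst_targets]
--     # 拼接
--     lib_target_a = "lib" + lower_target + ".a"
--     target_a = lower_target + ".a"
--     target_bundle = lower_target + ".bundle"
--     if lower_target in lower_targets or lib_target_a in lower_targets:
--         return True
--     if target_a in lower_targets or target_bundle in lower_targets:
--         return True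
--     return False
-- ===== SOURCE B (Python) =====
-- def judge_dst_target_or_bundle(target: str, dst_targets: list):
--     if target == "" or dst_targets is None:
--         return False
--     t = target.lower()
--     # Instead of constructing the four candidate names and scanning for them,
--     # parse each list element: strip a ".bundle" or ".a" suffix (and an
--     # optional "lib" prefix before ".a") and compare the remaining stem to t.
--     for x in dst_targets:
--         y = x.lower()
--         if y == t:
--             return True
--         if y.endswith(".bundle") and y[:-7] == t:
--             return True
--         if y.endswith(".a"):
--             stem = y[:-2]
--             if stem == t or (stem.startswith("lib") and stem[3:] == t):
--                 return True
--     return False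
-- ===== Notes on version B (the rewrite author's own statement) =====
-- stated objective: alternative
-- what changed: A constructs the four candidate names (t, lib+t+.a, t+.a, t+.bundle) and scans a lowered copy of the list for each; B never builds candidates: it parses each list element in one pass, stripping a .bundle or .a suffix and an optional lib prefix and comparing the remaining stem to the lowered target.
import Mathlib
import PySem

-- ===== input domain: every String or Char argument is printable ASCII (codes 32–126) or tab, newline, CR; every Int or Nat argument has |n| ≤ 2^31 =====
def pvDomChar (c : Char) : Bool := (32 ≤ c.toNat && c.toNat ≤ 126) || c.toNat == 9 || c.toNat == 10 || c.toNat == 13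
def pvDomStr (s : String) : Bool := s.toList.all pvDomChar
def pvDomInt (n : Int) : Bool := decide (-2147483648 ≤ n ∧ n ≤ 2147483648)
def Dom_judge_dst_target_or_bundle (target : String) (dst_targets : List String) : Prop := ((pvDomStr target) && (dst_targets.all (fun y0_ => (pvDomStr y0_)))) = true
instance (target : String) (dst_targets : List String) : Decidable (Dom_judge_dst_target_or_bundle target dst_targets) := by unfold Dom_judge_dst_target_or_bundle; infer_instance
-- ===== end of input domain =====

-- B replaces A's candidate-name construction + four list scans by a single pass that
-- parses each element (strip ".bundle"/".a" suffix, optional "lib" prefix) — alternative decomposition, same cost.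

-- ===== PORT A =====
-- literal port of A: lowered copy of the list, then four membership scans for the constructed names
def judge_dst_target_or_bundle (target : String) (dst_targets : List String) : Bool :=
  if target == "" then false
  else
    let lower_target := PySem.Str.lower target
    let lower_targets := dst_targets.map (fun x => PySem.Str.lower x)
    let lib_target_a := "lib" ++ lower_target ++ ".a"
    let target_a := lower_target ++ ".a"
    let target_bundle := lower_target ++ ".bundle"
    if lower_targets.contains lower_target || lower_targets.contains lib_target_a then true
    else if lower_targets.contains target_a || lower_targets.contains target_bundle then true
    else false

-- ===== PORT B =====
-- port of Source B: one pass, per-element suffix/prefix parsing instead of candidate construction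
def judge_dst_target_or_bundle_alt (target : String) (dst_targets : List String) : Bool :=
  if target == "" then false
  else
    let t := PySem.Str.lower target
    dst_targets.any (fun x =>
      let y := PySem.Str.lower x
      if y == t then true
      else if PySem.Str.endswith y ".bundle" && (PySem.Str.slice y none (some (-7)) == t) then true
      else if PySem.Str.endswith y ".a" then
        let stem := PySem.Str.slice y none (some (-2))
        stem == t || (PySem.Str.startswith stem "lib" && (PySem.Str.slice stem (some 3) none == t))
      else false)

-- ===== PRECONDITION & SPEC =====
def Spec_judge_dst_target_or_bundle (target : String) (dst_targets : List String) (out : Bool) : Prop := out = judge_dst_target_or_bundle_alt target dst_targets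
instance (target : String) (dst_targets : List String) (out : Bool) : Decidable (Spec_judge_dst_target_or_bundle target dst_targets out) := by unfold Spec_judge_dst_target_or_bundle; infer_instance

-- ===== CLAIM (what is proved, stated in full; the proofs are below) =====
def Claim_equal_judge_dst_target_or_bundle : Prop := ∀ (target : String) (dst_targets : List String), Dom_judge_dst_target_or_bundle target dst_targets → Spec_judge_dst_target_or_bundle target dst_targets (judge_dst_target_or_bundle target dst_targets)


-- ===== LEMMAS AND PROOFS =====

-- a list equals t ++ s iff s is a suffix and dropping |s| from the right leaves t
theorem pv_eq_append_iff_suffix_take {α : Type} (u t s : List α) :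
    u = t ++ s ↔ s <:+ u ∧ u.take (u.length - s.length) = t := by
  constructor
  · rintro rfl
    exact ⟨⟨t, rfl⟩, by simp⟩
  · rintro ⟨⟨v, rfl⟩, h⟩
    simp at h
    subst h; rfl

-- a list equals p ++ t iff p is a prefix and dropping |p| from the left leaves t
theorem pv_eq_append_iff_prefix_drop {α : Type} (u t p : List α) :
    u = p ++ t ↔ p <+: u ∧ u.drop p.length = t := by
  constructor
  · rintro rfl
    exact ⟨⟨t, rfl⟩, by simp⟩
  · rintro ⟨⟨v, rfl⟩, h⟩
    simp at h
    subst h; rfl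

-- A's two-stage early-return chain, as a disjunction
theorem pv_ifchain2 (c1 c2 : Bool) :
    ((if c1 then true else if c2 then true else false) = true) ↔ (c1 = true ∨ c2 = true) := by
  split_ifs <;> simp_all

-- B's if-chain of parse tests, as a disjunction
theorem pv_ifchain (c1 c2 c3 d : Bool) :
    ((if c1 then true else if c2 then true else if c3 then d else false) = true)
      ↔ (c1 = true ∨ c2 = true ∨ (c3 = true ∧ d = true)) := by
  split_ifs <;> simp_all

-- the parse test (suffix/prefix stripping) recognises exactly the four candidate names
theorem pv_parse_iff (u t : List Char) :
    (u = t
      ∨ (['.','b','u','n','d','l','e'] <:+ u ∧ u.take (u.length - 7) = t)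
      ∨ (['.','a'] <:+ u ∧ (u.take (u.length - 2) = t
          ∨ (['l','i','b'] <+: u.take (u.length - 2) ∧ (u.take (u.length - 2)).drop 3 = t))))
    ↔ (u = t ∨ u = ['l','i','b'] ++ t ++ ['.','a'] ∨ u = t ++ ['.','a'] ∨ u = t ++ ['.','b','u','n','d','l','e']) := by
  have hb : (['.','b','u','n','d','l','e'] <:+ u ∧ u.take (u.length - 7) = t)
      ↔ u = t ++ ['.','b','u','n','d','l','e'] := by
    rw [pv_eq_append_iff_suffix_take]; norm_num
  have ha1 : (['.','a'] <:+ u ∧ u.take (u.length - 2) = t) ↔ u = t ++ ['.','a'] := by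
    rw [pv_eq_append_iff_suffix_take]; norm_num
  have ha2 : (['.','a'] <:+ u ∧ (['l','i','b'] <+: u.take (u.length - 2)
        ∧ (u.take (u.length - 2)).drop 3 = t))
      ↔ u = ['l','i','b'] ++ t ++ ['.','a'] := by
    have hstem : (['l','i','b'] <+: u.take (u.length - 2) ∧ (u.take (u.length - 2)).drop 3 = t)
        ↔ u.take (u.length - 2) = ['l','i','b'] ++ t := by
      rw [pv_eq_append_iff_prefix_drop]; norm_num
    rw [hstem]
    have h2 := pv_eq_append_iff_suffix_take u (['l','i','b'] ++ t) ['.','a']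
    norm_num at h2
    exact h2.symm
  rw [and_or_left, ha1, ha2, hb]
  tauto

-- B's per-element Boolean test agrees with "y is one of A's four candidate names"
theorem pv_elem_check (y t : String) :
    ((if y == t then true
      else if PySem.Str.endswith y ".bundle" && (PySem.Str.slice y none (some (-7)) == t) then true
      else if PySem.Str.endswith y ".a" then
        (PySem.Str.slice y none (some (-2)) == t) ||
          (PySem.Str.startswith (PySem.Str.slice y none (some (-2))) "lib" &&
            (PySem.Str.slice (PySem.Str.slice y none (some (-2))) (some 3) none == t))
      else false) = true)
    ↔ (y = t ∨ y = "lib" ++ t ++ ".a" ∨ y = t ++ ".a" ∨ y = t ++ ".bundle") := by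
  have hstr : ∀ a b : String, a = b ↔ a.toList = b.toList :=
    fun a b => ⟨fun h => h ▸ rfl, fun h => String.toList_injective h⟩
  have hsl7 : (PySem.Str.slice y none (some (-7))).toList = y.toList.take (y.toList.length - 7) := by
    simp [PySem.Str.slice]
    rw [PySem.List.slice_to_neg_ofNat _ 7 (by omega), String.length_toList]
  have hsl2 : (PySem.Str.slice y none (some (-2))).toList = y.toList.take (y.toList.length - 2) := by
    simp [PySem.Str.slice]
    rw [PySem.List.slice_to_neg_ofNat _ 2 (by omega), String.length_toList]
  have hsl3 : ∀ s : String, (PySem.Str.slice s (some 3) none).toList = s.toList.drop 3 := by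
    intro s
    simp [PySem.Str.slice]
    have := PySem.List.slice_from s.toList (a := 3) (by norm_num)
    simpa using this
  rw [pv_ifchain]
  rw [hstr y t, hstr y ("lib" ++ t ++ ".a"), hstr y (t ++ ".a"), hstr y (t ++ ".bundle")]
  simp only [beq_iff_eq, Bool.and_eq_true, Bool.or_eq_true, hstr,
    PySem.Str.endswith_eq, PySem.Chars.endswith_iff,
    PySem.Str.startswith_eq, PySem.Chars.startswith_iff,
    hsl3, hsl2, hsl7, String.toList_append,
    show (".bundle" : String).toList = ['.','b','u','n','d','l','e'] from rfl,
    show (".a" : String).toList = ['.','a'] from rfl,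
    show ("lib" : String).toList = ['l','i','b'] from rfl]
  exact pv_parse_iff y.toList t.toList

-- ===== VERDICT (by name: the statement is the Claim_ definition above) =====
theorem judge_dst_target_or_bundle_spec : Claim_equal_judge_dst_target_or_bundle := by
  intro target dst_targets _
  unfold Spec_judge_dst_target_or_bundle judge_dst_target_or_bundle judge_dst_target_or_bundle_alt
  by_cases h : target == ""
  · simp [h]
  · simp only [h, if_false, Bool.false_eq_true]
    apply Bool.eq_iff_iff.mpr
    rw [pv_ifchain2]
    simp only [Bool.or_eq_true, List.contains_eq_mem, List.mem_map, decide_eq_true_eq,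
      List.any_eq_true]
    constructor
    · rintro ((⟨x,hx,he⟩|⟨x,hx,he⟩)|(⟨x,hx,he⟩|⟨x,hx,he⟩)) <;>
        exact ⟨x, hx, (pv_elem_check (PySem.Str.lower x) (PySem.Str.lower target)).mpr (by tauto)⟩
    · rintro ⟨x, hx, hv⟩
      rcases (pv_elem_check (PySem.Str.lower x) (PySem.Str.lower target)).mp hv with h1|h1|h1|h1
      · exact Or.inl (Or.inl ⟨x, hx, h1⟩)
      · exact Or.inl (Or.inr ⟨x, hx, h1⟩)
      · exact Or.inr (Or.inl ⟨x, hx, h1⟩)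
      · exact Or.inr (Or.inr ⟨x, hx, h1⟩)
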